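-- pv_equiv track=rewrite | github.com/jklypchak13/advent_of_code | 2023/day22/day22.py | add_to_space
-- ===== SOURCE A (Python) =====
-- def add_to_space(first, second, brick_id, space):
--     res = set()
--
--     min_x = min(first[0], second[0])
--     min_y = min(first[1], second[1])
--     min_z = min(first[2], second[2])
--     max_x = max(first[0], second[0])
--     max_y = max(first[1], second[1])
--     max_z = max(first[2], second[2])
--
--     closest_z = 0
--     for (x, y, z), id in space.items():
--         if min_x <= x <= max_x and min_y <= y <= max_y:
--             if z > closest_z:
--                 res = set([id])
--                 closest_z = z
--             elif z == closest_z: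
--                 res.add(id)
--
--     shift = closest_z + 1 - min_z
--     for x in range(min_x, max_x + 1):
--         for y in range(min_y, max_y + 1):
--             for z in range(min_z + shift, max_z + 1 + shift):
--                 space[(x, y, z)] = brick_id
--     return res
-- ===== SOURCE B (Python) =====
-- def add_to_space(first, second, brick_id, space):
--     min_x = min(first[0], second[0])
--     min_y = min(first[1], second[1])
--     min_z = min(first[2], second[2])
--     max_x = max(first[0], second[0])
--     max_y = max(first[1], second[1])
--     max_z = max(first[2], second[2])
--
--     # sort the footprint cells by height, tallest first (stable), and read off the top run
--     cells = sorted([item for item in space.items()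
--                     if min_x <= item[0][0] <= max_x and min_y <= item[0][1] <= max_y],
--                    key=lambda item: item[0][2], reverse=True)
--     closest_z = max(cells[0][0][2], 0) if cells else 0
--     res = set()
--     for (x, y, z), id in cells:
--         if z != closest_z:
--             break
--         res.add(id)
--
--     shift = closest_z + 1 - min_z
--     for x in range(min_x, max_x + 1):
--         for y in range(min_y, max_y + 1):
--             for z in range(min_z + shift, max_z + 1 + shift):
--                 space[(x, y, z)] = brick_id
--     return res
-- ===== Notes on version B (the rewrite author's own statement) =====
-- stated objective: alternative
-- what changed: Replaces A's single-pass running-max scan with mutable (res, closest_z) state by sort-then-scan: stably sort the footprint cells by z descending, take the head's z (floored at ground 0) as closest_z, and collect the ids of the leading run at that height.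
import Mathlib
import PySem

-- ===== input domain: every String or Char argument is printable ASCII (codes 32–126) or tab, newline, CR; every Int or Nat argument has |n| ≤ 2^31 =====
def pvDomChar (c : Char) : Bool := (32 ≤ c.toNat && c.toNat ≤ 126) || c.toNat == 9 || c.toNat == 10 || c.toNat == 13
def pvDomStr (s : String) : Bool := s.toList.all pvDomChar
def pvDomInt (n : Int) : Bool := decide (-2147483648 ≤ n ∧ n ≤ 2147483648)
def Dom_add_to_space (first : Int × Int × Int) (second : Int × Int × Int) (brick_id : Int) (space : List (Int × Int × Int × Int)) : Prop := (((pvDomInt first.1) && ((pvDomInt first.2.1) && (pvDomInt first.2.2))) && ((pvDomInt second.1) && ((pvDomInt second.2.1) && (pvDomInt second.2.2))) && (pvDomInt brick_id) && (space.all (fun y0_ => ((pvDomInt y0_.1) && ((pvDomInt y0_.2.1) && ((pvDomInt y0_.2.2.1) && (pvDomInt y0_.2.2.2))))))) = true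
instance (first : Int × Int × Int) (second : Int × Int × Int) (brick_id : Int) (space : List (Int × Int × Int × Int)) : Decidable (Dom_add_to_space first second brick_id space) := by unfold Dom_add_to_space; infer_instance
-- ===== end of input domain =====

-- B replaces A's single-pass running-max scan by sort-then-scan: stably sort the footprint
-- cells by height, tallest first, and read the supporting ids off the leading run (objective: alternative).
-- Both Pythons also MUTATE `space` (identically); the equivalence proved here is about the RETURN value only,
-- so the final placement loop (which does not affect the returned set) is not modelled in the ports.

-- ===== PORT A =====
def add_to_space (first : Int × Int × Int) (second : Int × Int × Int) (brick_id : Int) (space : List (Int × Int × Int × Int)) : List Int :=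
  let min_x := min first.1 second.1
  let min_y := min first.2.1 second.2.1
  let max_x := max first.1 second.1
  let max_y := max first.2.1 second.2.1
  -- running scan: res is a Python set, closest_z the best z seen so far (0 = ground)
  let st := space.foldl (fun (acc : PySem.Set Int × Int) e =>
    if min_x ≤ e.1 ∧ e.1 ≤ max_x ∧ min_y ≤ e.2.1 ∧ e.2.1 ≤ max_y then
      if acc.2 < e.2.2.1 then (PySem.Set.ofList [e.2.2.2], e.2.2.1)
      else if e.2.2.1 = acc.2 then (PySem.Set.add acc.1 e.2.2.2, acc.2)
      else acc
    else acc) (PySem.Set.empty, 0)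
  st.1

-- ===== PORT B =====
def add_to_space_alt (first : Int × Int × Int) (second : Int × Int × Int) (brick_id : Int) (space : List (Int × Int × Int × Int)) : List Int :=
  let min_x := min first.1 second.1
  let min_y := min first.2.1 second.2.1
  let max_x := max first.1 second.1
  let max_y := max first.2.1 second.2.1
  -- stable sort of the footprint cells by z, tallest first
  let cells := PySem.List.sorted
    (space.filter (fun e => decide (min_x ≤ e.1 ∧ e.1 ≤ max_x ∧ min_y ≤ e.2.1 ∧ e.2.1 ≤ max_y)))
    (fun e => e.2.2.1) true
  let closest_z : Int := match cells with | [] => 0 | c :: _ => max c.2.2.1 0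
  -- the loop with break = take the leading run at height closest_z, adding ids to the set
  (cells.takeWhile (fun e => decide (e.2.2.1 = closest_z))).foldl
    (fun s e => PySem.Set.add s e.2.2.2) PySem.Set.empty

-- ===== PRECONDITION & SPEC =====
def Spec_add_to_space (first : Int × Int × Int) (second : Int × Int × Int) (brick_id : Int) (space : List (Int × Int × Int × Int)) (out : List Int) : Prop := out = add_to_space_alt first second brick_id space
instance (first : Int × Int × Int) (second : Int × Int × Int) (brick_id : Int) (space : List (Int × Int × Int × Int)) (out : List Int) : Decidable (Spec_add_to_space first second brick_id space out) := by unfold Spec_add_to_space; infer_instance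

-- ===== CLAIM (what is proved, stated in full; the proofs are below) =====
def Claim_equal_add_to_space : Prop := ∀ (first : Int × Int × Int) (second : Int × Int × Int) (brick_id : Int) (space : List (Int × Int × Int × Int)), Dom_add_to_space first second brick_id space → Spec_add_to_space first second brick_id space (add_to_space first second brick_id space)

-- ===== LEMMAS AND PROOFS =====

-- Invariant of A's scan, by reverse induction on the list: after any prefix, the accumulator
-- is exactly (ids at the current max z (ground 0) among footprint cells, that max).
theorem scan_invariant (p : (Int × Int × Int × Int) → Prop) [DecidablePred p]
    (l : List (Int × Int × Int × Int)) :
    l.foldl (fun (acc : PySem.Set Int × Int) e =>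
      if p e then
        if acc.2 < e.2.2.1 then (PySem.Set.ofList [e.2.2.2], e.2.2.1)
        else if e.2.2.1 = acc.2 then (PySem.Set.add acc.1 e.2.2.2, acc.2)
        else acc
      else acc) (PySem.Set.empty, 0) =
    (PySem.Set.ofList ((l.filter (fun e => decide (p e))).filterMap
        (fun e => if e.2.2.1 = (l.filter (fun e => decide (p e))).foldl (fun m e => max m e.2.2.1) 0
                  then some e.2.2.2 else none)),
     (l.filter (fun e => decide (p e))).foldl (fun m e => max m e.2.2.1) 0) := by
  induction l using List.reverseRecOn with
  | nil => rfl
  | append_singleton l a ih =>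
    rw [List.foldl_append, ih, List.filter_append]
    by_cases hpa : p a
    · simp only [List.filter_cons, List.filter_nil, hpa, decide_true, if_true, List.foldl_append]
      set Fl := l.filter (fun e => decide (p e)) with hFl
      set C : Int := Fl.foldl (fun m e => max m e.2.2.1) 0 with hC
      have hbound : ∀ e ∈ Fl, e.2.2.1 ≤ C := by
        intro e he
        have h := (PySem.List.le_foldl_max (Fl.map (fun e => e.2.2.1)) 0).2 e.2.2.1
          (List.mem_map_of_mem he)
        rwa [List.foldl_map] at h
      rcases lt_trichotomy C a.2.2.1 with h | h | h
      · simp only [List.foldl_cons, List.foldl_nil, hpa, h, if_pos, max_eq_right h.le]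
        have hnil : Fl.filterMap (fun e => if e.2.2.1 = a.2.2.1 then some e.2.2.2 else none)
            = [] := by
          rw [List.filterMap_eq_nil_iff]
          intro e he
          have : e.2.2.1 ≠ a.2.2.1 := by
            have := hbound e he; omega
          simp [this]
        rw [List.filterMap_append, hnil]
        simp [PySem.Set.ofList]
      · have hofl : ∀ (xs : List Int) (x : Int),
            PySem.Set.ofList (xs ++ [x]) = (PySem.Set.ofList xs).add x := by
          intro xs x
          show List.foldl PySem.Set.add [] (xs ++ [x]) = _
          rw [List.foldl_append]
          rfl
        simp [hpa, h, List.filterMap_append, hofl]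
      · have hne : ¬ C < a.2.2.1 := by omega
        have hne2 : a.2.2.1 ≠ C := by omega
        simp only [List.foldl_cons, List.foldl_nil, hpa, if_true, if_neg hne,
          max_eq_left h.le, List.filterMap_append, List.filterMap_cons, List.filterMap_nil,
          hne2, if_false, List.append_nil]
    · simp [hpa]

-- Inserting a with key a ≠ c does not change the cells at height c.
theorem filter_insertBy_ne (a : Int × Int × Int × Int) (c : Int) (hne : a.2.2.1 ≠ c)
    (l : List (Int × Int × Int × Int)) :
    (PySem.List.insertBy (fun x y => decide (y.2.2.1 < x.2.2.1)) a l).filter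
        (fun e => decide (e.2.2.1 = c)) =
    l.filter (fun e => decide (e.2.2.1 = c)) := by
  induction l with
  | nil => simp [PySem.List.insertBy, hne]
  | cons y ys ih =>
    by_cases h : y.2.2.1 < a.2.2.1
    · simp [PySem.List.insertBy, h, hne]
    · simp only [PySem.List.insertBy, decide_eq_true_eq, if_neg h, List.filter_cons]
      rw [ih]

-- Stable insertion of a into a height-descending list appends a to the cells at its own height.
theorem filter_insertBy_eq (a : Int × Int × Int × Int)
    (l : List (Int × Int × Int × Int))
    (hp : l.Pairwise (fun x y => y.2.2.1 ≤ x.2.2.1)) :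
    (PySem.List.insertBy (fun x y => decide (y.2.2.1 < x.2.2.1)) a l).filter
        (fun e => decide (e.2.2.1 = a.2.2.1)) =
    l.filter (fun e => decide (e.2.2.1 = a.2.2.1)) ++ [a] := by
  induction l with
  | nil => simp [PySem.List.insertBy]
  | cons y ys ih =>
    rcases List.pairwise_cons.mp hp with ⟨hy, hys⟩
    by_cases h : y.2.2.1 < a.2.2.1
    · have hnil : (y :: ys).filter (fun e => decide (e.2.2.1 = a.2.2.1)) = [] := by
        rw [List.filter_eq_nil_iff]
        intro e he
        rcases List.mem_cons.mp he with rfl | he'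
        · simp; omega
        · have := hy e he'; simp; omega
      simp only [PySem.List.insertBy, decide_eq_true_eq, if_pos h, hnil, List.nil_append]
      rw [List.filter_cons_of_pos (by simp), hnil]
    · simp only [PySem.List.insertBy, decide_eq_true_eq, if_neg h, List.filter_cons]
      rw [ih hys]
      split <;> simp
-- Stability: the cells at any fixed height c, in a stable z-descending sort, are the cells
-- at height c of the original list, in the original order.
theorem filter_sorted_rev (xs : List (Int × Int × Int × Int)) (c : Int) :
    (PySem.List.sorted xs (fun e => e.2.2.1) true).filter (fun e => decide (e.2.2.1 = c)) =
    xs.filter (fun e => decide (e.2.2.1 = c)) := by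
  induction xs using List.reverseRecOn with
  | nil => rfl
  | append_singleton l a ih =>
    have hstep : PySem.List.sorted (l ++ [a]) (fun e => e.2.2.1) true =
        PySem.List.insertBy (fun x y => decide (y.2.2.1 < x.2.2.1)) a
          (PySem.List.sorted l (fun e => e.2.2.1) true) := by
      rw [PySem.List.sorted_rev_eq_foldl_insertBy, List.foldl_append,
        ← PySem.List.sorted_rev_eq_foldl_insertBy]
      rfl
    rw [hstep, List.filter_append]
    by_cases h : a.2.2.1 = c
    · subst h
      rw [filter_insertBy_eq a _ (PySem.List.sorted_pairwise_rev l (fun e => e.2.2.1)), ih]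
      simp
    · rw [filter_insertBy_ne a c h, ih]
      simp [h]

-- On a z-descending list whose heights are all ≤ C, the leading run at height C is the
-- filter at height C.
theorem takeWhile_eq_filter (C : Int) (l : List (Int × Int × Int × Int))
    (hp : l.Pairwise (fun x y => y.2.2.1 ≤ x.2.2.1))
    (hb : ∀ x ∈ l, x.2.2.1 ≤ C) :
    l.takeWhile (fun e => decide (e.2.2.1 = C)) = l.filter (fun e => decide (e.2.2.1 = C)) := by
  induction l with
  | nil => rfl
  | cons y ys ih =>
    rcases List.pairwise_cons.mp hp with ⟨hy, hys⟩
    by_cases h : y.2.2.1 = C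
    · rw [List.takeWhile_cons_of_pos (by simp [h]), List.filter_cons_of_pos (by simp [h]),
        ih hys (fun x hx => hb x (List.mem_cons_of_mem _ hx))]
    · have hlt : y.2.2.1 < C := lt_of_le_of_ne (hb y (List.mem_cons_self)) h
      rw [List.takeWhile_cons_of_neg (by simp [h]), List.filter_cons_of_neg (by simp [h])]
      symm
      rw [List.filter_eq_nil_iff]
      intro e he
      have := hy e he
      simp; omega

-- The head height of the z-descending sort, floored at 0, is the running max (ground 0).
theorem head_sorted_rev_max (Fl : List (Int × Int × Int × Int)) :
    (match PySem.List.sorted Fl (fun e => e.2.2.1) true with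
      | [] => (0 : Int) | c :: _ => max c.2.2.1 0) =
    Fl.foldl (fun m e => max m e.2.2.1) 0 := by
  rcases hs : PySem.List.sorted Fl (fun e => e.2.2.1) true with _ | ⟨c, t⟩
  · rw [(PySem.List.sorted_eq_nil_iff Fl _ true).mp hs]
    rfl
  · simp only []
    have hmem : c ∈ Fl := (PySem.List.mem_sorted Fl _ true c).mp (hs ▸ List.mem_cons_self)
    have hbd := PySem.List.le_foldl_max_int Fl (fun e => e.2.2.1) 0
    have hle : max c.2.2.1 0 ≤ Fl.foldl (fun m e => max m e.2.2.1) 0 :=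
      max_le (hbd.2 c hmem) hbd.1
    have hge : Fl.foldl (fun m e => max m e.2.2.1) 0 ≤ max c.2.2.1 0 := by
      have hmap : Fl.foldl (fun m e => max m e.2.2.1) 0 =
          (Fl.map (fun e => e.2.2.1)).foldl max 0 := by rw [List.foldl_map]
      rcases PySem.List.foldl_max_mem (Fl.map (fun e => e.2.2.1)) 0 with h | h
      · rw [hmap, h]; exact le_max_right _ _
      · rcases List.mem_map.mp h with ⟨x, hx, hxe⟩
        have := PySem.List.key_head_sorted_rev_ge Fl (fun e => e.2.2.1) hs x hx
        rw [hmap, ← hxe]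
        exact le_trans this (le_max_left _ _)
    exact le_antisymm hle hge

-- Collecting f e over the filtered list into a set = ofList of the filterMap.
theorem ofList_filterMap_eq_foldl (C : Int) (l : List (Int × Int × Int × Int)) :
    PySem.Set.ofList (l.filterMap (fun e => if e.2.2.1 = C then some e.2.2.2 else none)) =
    (l.filter (fun e => decide (e.2.2.1 = C))).foldl
      (fun s e => PySem.Set.add s e.2.2.2) PySem.Set.empty := by
  have h : l.filterMap (fun e => if e.2.2.1 = C then some e.2.2.2 else none) =
      (l.filter (fun e => decide (e.2.2.1 = C))).map (fun e => e.2.2.2) := by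
    induction l with
    | nil => rfl
    | cons y ys ih =>
      by_cases hy : y.2.2.1 = C <;> simp [hy, ih]
  rw [h]
  show List.foldl PySem.Set.add [] _ = _
  rw [List.foldl_map]
  rfl

theorem add_to_space_spec : Claim_equal_add_to_space := by
  intro first second brick_id space _
  show add_to_space first second brick_id space = add_to_space_alt first second brick_id space
  simp only [add_to_space, add_to_space_alt]
  rw [scan_invariant (fun e => min first.1 second.1 ≤ e.1 ∧ e.1 ≤ max first.1 second.1 ∧
    min first.2.1 second.2.1 ≤ e.2.1 ∧ e.2.1 ≤ max first.2.1 second.2.1)]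
  set Fl := space.filter (fun e => decide (min first.1 second.1 ≤ e.1 ∧ e.1 ≤ max first.1 second.1 ∧
    min first.2.1 second.2.1 ≤ e.2.1 ∧ e.2.1 ≤ max first.2.1 second.2.1)) with hFl
  set C : Int := Fl.foldl (fun m e => max m e.2.2.1) 0 with hC
  rw [head_sorted_rev_max Fl]
  rw [takeWhile_eq_filter C _ (PySem.List.sorted_pairwise_rev Fl (fun e => e.2.2.1))
    (fun x hx => by
      have hxFl : x ∈ Fl := (PySem.List.mem_sorted Fl _ true x).mp hx
      have h := (PySem.List.le_foldl_max_int Fl (fun e => e.2.2.1) 0).2 x hxFl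
      exact h)]
  rw [filter_sorted_rev Fl C]
  exact ofList_filterMap_eq_foldl C Fl
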